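-- pv_equiv track=rewrite | github.com/StephKua/CodeWars | 6thKyu_Return_String_As_Sorted_Blocks.py | print_dict_values
-- ===== SOURCE A (Python) =====
-- def print_dict_values(order_dict):
--   lower = ''
--   upper = ''
--   num = ''
--   for k,v in order_dict.items():
--     if order_dict[k] != 0:
--       if k.islower():
--         lower += k
--         order_dict[k] -= 1
--       elif k.isupper():
--         upper += k
--         order_dict[k] -= 1
--       else:
--         num += k
--         order_dict[k] -= 1
--     lower = ''.join(sorted(lower))
--     upper = ''.join(sorted(upper))
--     num = ''.join(sorted(num))
--   final = lower + upper + num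
--   return final, order_dict
-- ===== SOURCE B (Python) =====
-- def print_dict_values(order_dict):
--     # One global pass: gather nonzero keys once, sort each bucket's characters
--     # once at the end, decrement the nonzero keys in a separate loop.
--     nonzero = [k for k, v in order_dict.items() if v != 0]
--     lower = sorted(ch for k in nonzero if k.islower() for ch in k)
--     upper = sorted(ch for k in nonzero if k.isupper() for ch in k)
--     num = sorted(ch for k in nonzero if not k.islower() and not k.isupper() for ch in k)
--     final = ''.join(lower + upper + num)
--     for k in nonzero:
--         order_dict[k] -= 1
--     return final, order_dict
-- ===== Notes on version B (the rewrite author's own statement) =====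
-- stated objective: faster
-- what changed: Instead of re-sorting all three buckets on every loop iteration while reading and mutating the dict inside the same loop, B collects the nonzero keys once, sorts each bucket's characters exactly once at the end, and decrements the nonzero keys in a separate pass.
import Mathlib
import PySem

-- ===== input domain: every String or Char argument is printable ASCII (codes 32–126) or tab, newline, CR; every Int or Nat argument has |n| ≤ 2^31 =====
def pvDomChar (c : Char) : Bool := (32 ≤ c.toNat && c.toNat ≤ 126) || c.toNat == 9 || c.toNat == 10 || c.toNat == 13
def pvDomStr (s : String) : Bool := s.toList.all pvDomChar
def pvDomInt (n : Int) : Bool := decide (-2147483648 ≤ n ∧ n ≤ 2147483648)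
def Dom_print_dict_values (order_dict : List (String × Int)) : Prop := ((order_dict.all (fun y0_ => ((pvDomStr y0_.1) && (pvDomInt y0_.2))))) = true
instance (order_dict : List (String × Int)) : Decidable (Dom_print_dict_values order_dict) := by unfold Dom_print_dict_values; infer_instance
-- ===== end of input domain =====

-- B sorts each bucket's characters once at the end instead of re-sorting every
-- iteration, and decrements the nonzero keys in a separate pass (objective:
-- faster, measured). A (and B) mutate the dict argument
-- in place; the equivalence proved here is about the returned pair.

-- str.islower() / str.isupper(), exact on the printable-ASCII domain (where the
-- cased characters are exactly the letters): at least one cased character and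
-- all cased characters of the given case.
def pyStrIslower (s : String) : Bool :=
  s.toList.any PySem.Chars.islower && !(s.toList.any PySem.Chars.isupper)
def pyStrIsupper (s : String) : Bool :=
  s.toList.any PySem.Chars.isupper && !(s.toList.any PySem.Chars.islower)

-- ===== PORT A =====
-- loop body of A: test the CURRENT dict value, append the key's characters to a
-- bucket and decrement, then re-sort all three buckets (as A does every iteration).
-- (order_dict[k] is read with getD: k comes from items(), so it is present.)
def pvStepA (st : List Char × List Char × List Char × PySem.Dict String Int)
    (kv : String × Int) : List Char × List Char × List Char × PySem.Dict String Int :=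
  let (lo, up, nu, d) := st
  let (lo, up, nu, d) :=
    if d.getD kv.1 0 != 0 then
      if pyStrIslower kv.1 then (lo ++ kv.1.toList, up, nu, d.modify kv.1 0 (· - 1))
      else if pyStrIsupper kv.1 then (lo, up ++ kv.1.toList, nu, d.modify kv.1 0 (· - 1))
      else (lo, up, nu ++ kv.1.toList, d.modify kv.1 0 (· - 1))
    else (lo, up, nu, d)
  (PySem.List.sorted lo (fun c => c) false, PySem.List.sorted up (fun c => c) false,
   PySem.List.sorted nu (fun c => c) false, d)

def print_dict_values (order_dict : List (String × Int)) : String × (List (String × Int)) :=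
  let d0 := PySem.Dict.ofList order_dict
  let st := d0.items.foldl pvStepA ([], [], [], d0)
  (String.ofList (st.1 ++ st.2.1 ++ st.2.2.1), st.2.2.2.items)

-- ===== PORT B =====
def print_dict_values_alt (order_dict : List (String × Int)) : String × (List (String × Int)) :=
  let d := PySem.Dict.ofList order_dict
  let nonzero := (d.items.filter (fun p => p.2 != 0)).map (·.1)
  let lower := PySem.List.sorted ((nonzero.filter (fun k => pyStrIslower k)).flatMap String.toList) (fun c => c) false
  let upper := PySem.List.sorted ((nonzero.filter (fun k => pyStrIsupper k)).flatMap String.toList) (fun c => c) false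
  let num := PySem.List.sorted ((nonzero.filter (fun k => !pyStrIslower k && !pyStrIsupper k)).flatMap String.toList) (fun c => c) false
  let final := String.ofList (lower ++ upper ++ num)
  let d2 := nonzero.foldl (fun d k => d.modify k 0 (· - 1)) d
  (final, d2.items)

-- ===== PRECONDITION & SPEC =====
def Spec_print_dict_values (order_dict : List (String × Int)) (out : String × (List (String × Int))) : Prop := out = print_dict_values_alt order_dict
instance (order_dict : List (String × Int)) (out : String × (List (String × Int))) : Decidable (Spec_print_dict_values order_dict out) := by unfold Spec_print_dict_values; infer_instance

-- ===== CLAIM (what is proved, stated in full; the proofs are below) =====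
def Claim_equal_print_dict_values : Prop := ∀ (order_dict : List (String × Int)), Dom_print_dict_values order_dict → Spec_print_dict_values order_dict (print_dict_values order_dict)

-- ===== LEMMAS AND PROOFS =====

-- sorting again after appending to an already-sorted bucket = one final sort
lemma sorted_sorted_append (a b : List Char) :
    PySem.List.sorted (PySem.List.sorted a (fun c => c) false ++ b) (fun c => c) false
      = PySem.List.sorted (a ++ b) (fun c => c) false := by
  refine PySem.List.sorted_eq_sorted_of_perm _ _ _ (fun x y h => h) ?_
  exact (PySem.List.sorted_perm a (fun c => c) false).append_right b

-- the loop of A, characterised: with sorted buckets and a dict agreeing with the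
-- remaining items (keys distinct), it appends each bucket's characters and
-- decrements the nonzero keys, with one final sort of each bucket.
lemma loopA_spec (l : List (String × Int)) (lo up nu : List Char) (d : PySem.Dict String Int)
    (hinv : ∀ p ∈ l, d.getD p.1 0 = p.2) (hnd : (l.map Prod.fst).Nodup) :
    l.foldl pvStepA (PySem.List.sorted lo (fun c => c) false,
                     PySem.List.sorted up (fun c => c) false,
                     PySem.List.sorted nu (fun c => c) false, d)
      = (PySem.List.sorted (lo ++ ((l.filter (fun p => p.2 != 0 && pyStrIslower p.1)).flatMap (fun p => p.1.toList))) (fun c => c) false,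
         PySem.List.sorted (up ++ ((l.filter (fun p => p.2 != 0 && !pyStrIslower p.1 && pyStrIsupper p.1)).flatMap (fun p => p.1.toList))) (fun c => c) false,
         PySem.List.sorted (nu ++ ((l.filter (fun p => p.2 != 0 && !pyStrIslower p.1 && !pyStrIsupper p.1)).flatMap (fun p => p.1.toList))) (fun c => c) false,
         ((l.filter (fun p => p.2 != 0)).map (·.1)).foldl (fun d k => d.modify k 0 (· - 1)) d) := by
  induction l generalizing lo up nu d with
  | nil => simp
  | cons kv t ih =>
    obtain ⟨k, v⟩ := kv
    have hk : d.getD k 0 = v := hinv (k, v) (by simp)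
    have hknott : ∀ p ∈ t, p.1 ≠ k := by
      intro p hp
      simp only [List.map_cons, List.nodup_cons] at hnd
      intro h; exact hnd.1 (h ▸ List.mem_map_of_mem hp)
    have hndt : (t.map Prod.fst).Nodup := (by simp only [List.map_cons, List.nodup_cons] at hnd; exact hnd.2)
    have hinvmod : ∀ p ∈ t, (d.modify k 0 (· - 1)).getD p.1 0 = p.2 := by
      intro p hp
      rw [PySem.Dict.getD_modify_of_ne d 0 (· - 1) (hknott p hp)]
      exact hinv p (List.mem_cons_of_mem _ hp)
    by_cases hv : v = 0
    · have : pvStepA (PySem.List.sorted lo (fun c => c) false,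
          PySem.List.sorted up (fun c => c) false,
          PySem.List.sorted nu (fun c => c) false, d) (k, v)
          = (PySem.List.sorted lo (fun c => c) false,
             PySem.List.sorted up (fun c => c) false,
             PySem.List.sorted nu (fun c => c) false, d) := by
        simp [pvStepA, hk, hv]
      rw [List.foldl_cons, this, ih lo up nu d (fun p hp => hinv p (List.mem_cons_of_mem _ hp)) hndt]
      simp [hv]
    · by_cases hlo : pyStrIslower k
      · have : pvStepA (PySem.List.sorted lo (fun c => c) false,
            PySem.List.sorted up (fun c => c) false,
            PySem.List.sorted nu (fun c => c) false, d) (k, v)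
            = (PySem.List.sorted (lo ++ k.toList) (fun c => c) false,
               PySem.List.sorted up (fun c => c) false,
               PySem.List.sorted nu (fun c => c) false, d.modify k 0 (· - 1)) := by
          simp [pvStepA, hk, hv, hlo, sorted_sorted_append]
        rw [List.foldl_cons, this,
            ih (lo ++ k.toList) up nu (d.modify k 0 (· - 1)) hinvmod hndt]
        simp [hv, hlo, List.append_assoc]
      · by_cases hup : pyStrIsupper k
        · have : pvStepA (PySem.List.sorted lo (fun c => c) false,
              PySem.List.sorted up (fun c => c) false,
              PySem.List.sorted nu (fun c => c) false, d) (k, v)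
              = (PySem.List.sorted lo (fun c => c) false,
                 PySem.List.sorted (up ++ k.toList) (fun c => c) false,
                 PySem.List.sorted nu (fun c => c) false, d.modify k 0 (· - 1)) := by
            simp [pvStepA, hk, hv, hlo, hup, sorted_sorted_append]
          rw [List.foldl_cons, this,
              ih lo (up ++ k.toList) nu (d.modify k 0 (· - 1)) hinvmod hndt]
          simp [hv, hlo, hup, List.append_assoc]
        · have : pvStepA (PySem.List.sorted lo (fun c => c) false,
              PySem.List.sorted up (fun c => c) false,
              PySem.List.sorted nu (fun c => c) false, d) (k, v)
              = (PySem.List.sorted lo (fun c => c) false,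
                 PySem.List.sorted up (fun c => c) false,
                 PySem.List.sorted (nu ++ k.toList) (fun c => c) false, d.modify k 0 (· - 1)) := by
            simp [pvStepA, hk, hv, hlo, hup, sorted_sorted_append]
          rw [List.foldl_cons, this,
              ih lo up (nu ++ k.toList) (d.modify k 0 (· - 1)) hinvmod hndt]
          simp [hv, hlo, hup, List.append_assoc]

-- a string cannot be both islower and isupper
lemma lower_not_upper (s : String) : pyStrIslower s = true → pyStrIsupper s = false := by
  intro h
  unfold pyStrIslower at h
  unfold pyStrIsupper
  simp only [Bool.and_eq_true, Bool.not_eq_true'] at h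
  simp [h.2]

-- B's "filter the nonzero keys, then filter by case" = A's combined filter
lemma filter_map_fst (l : List (String × Int)) (q : String → Bool) :
    ((l.filter (fun p => p.2 != 0)).map (·.1)).filter q
      = (l.filter (fun p => p.2 != 0 && q p.1)).map (·.1) := by
  rw [List.filter_map, List.filter_filter]
  congr 1
  apply List.filter_congr
  intro p _
  simp [Function.comp, Bool.and_comm]

-- ===== VERDICT (by name: the statement is the Claim_ definition above) =====
theorem print_dict_values_spec : Claim_equal_print_dict_values := by
  intro order_dict _
  show _ = _
  unfold print_dict_values print_dict_values_alt
  dsimp only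
  set d0 := PySem.Dict.ofList order_dict with hd0
  have hnd : (d0.items.map Prod.fst).Nodup := by
    have := PySem.Dict.nodup_keys_ofList (κ := String) (ν := Int) order_dict
    simpa [PySem.Dict.keys, hd0] using this
  have hinv : ∀ p ∈ d0.items, d0.getD p.1 0 = p.2 := by
    intro p hp
    exact PySem.Dict.getD_of_mem_items d0 hp (by simpa [PySem.Dict.keys] using hnd) 0
  have h := loopA_spec d0.items [] [] [] d0 hinv hnd
  simp only [show PySem.List.sorted ([] : List Char) (fun c => c) false = [] from rfl,
    List.nil_append] at h
  rw [h]
  simp only [filter_map_fst, List.flatMap_map, Bool.and_assoc]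
  congr 3
  congr 1
  refine congrArg (fun l : List (String × Int) => PySem.List.sorted (List.flatMap (fun p => p.1.toList) l) (fun c : Char => c) false) ?_
  apply List.filter_congr
  intro p _
  cases hl : pyStrIslower p.1
  · simp
  · rw [lower_not_upper p.1 hl]
    simp
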